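-- pv_equiv track=rewrite | github.com/kaosushijin/aurora-rp | remod-staging/uilib.py | _find_wrap_break_point
-- ===== SOURCE A (Python) =====
-- def _find_wrap_break_point(text: str, max_width: int) -> int:
--     """Find optimal break point for line wrapping"""
--     if len(text) <= max_width:
--         return len(text)
--
--     # Preferred break characters (in order of preference)
--     break_chars = [' ', '\t', '-', ',', '.', ';', ':', '!', '?']
--
--     # Look for break point working backwards from max width
--     for i in range(min(max_width, len(text)), max(0, max_width - 20), -1):
--         if i < len(text) and text[i] in break_chars:
--             # For punctuation, include it in the current line
--             if text[i] in '.,;:!?':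
--                 return i + 1
--             else:
--                 return i
--
--     # No good break point found, force break at max width
--     return max_width
-- ===== SOURCE B (Python) =====
-- def _find_wrap_break_point(text: str, max_width: int) -> int:
--     """Find optimal break point for line wrapping (single forward pass over the window)."""
--     n = len(text)
--     if n <= max_width:
--         return n
--     if max_width <= 0:
--         return max_width  # search window is empty
--     lo = max(0, max_width - 20) + 1
--     best = -1
--     best_c = ''
--     for off, c in enumerate(text[lo:max_width + 1]):
--         if c in ' \t-,.;:!?':
--             best, best_c = lo + off, c
--     if best == -1:
--         return max_width
--     return best + 1 if best_c in '.,;:!?' else best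
-- ===== Notes on version B (the rewrite author's own statement) =====
-- stated objective: alternative
-- what changed: Replaces A's backward early-exit scan of up-to-20 index positions (indexing into the string and returning at the first break character) by a single forward pass over the sliced window that keeps the last break character seen, deciding the +1 punctuation adjustment from the kept character at the end.
import Mathlib
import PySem

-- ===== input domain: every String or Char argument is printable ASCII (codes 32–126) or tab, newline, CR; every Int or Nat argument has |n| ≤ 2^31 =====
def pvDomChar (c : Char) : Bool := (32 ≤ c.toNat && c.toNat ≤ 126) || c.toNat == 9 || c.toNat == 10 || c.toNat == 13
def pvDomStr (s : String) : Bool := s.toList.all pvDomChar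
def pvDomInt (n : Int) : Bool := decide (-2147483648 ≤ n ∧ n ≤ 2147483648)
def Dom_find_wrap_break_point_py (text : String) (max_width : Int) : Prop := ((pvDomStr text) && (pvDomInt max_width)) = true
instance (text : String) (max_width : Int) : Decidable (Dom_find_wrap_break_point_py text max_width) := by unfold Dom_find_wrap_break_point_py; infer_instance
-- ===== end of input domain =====

-- B replaces A's backward early-exit position scan by a single forward pass over the
-- window slice that keeps the last break character seen (objective: alternative).

-- ===== PORT A =====
-- literal transliteration of _find_wrap_break_point: backward scan, first hit returns
def find_wrap_break_point_py (text : String) (max_width : Int) : Int :=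
  if PySem.Str.len text ≤ max_width then PySem.Str.len text
  else
    let break_chars : List Char := [' ', '\t', '-', ',', '.', ';', ':', '!', '?']
    match (PySem.List.pyRange (min max_width (PySem.Str.len text)) (max 0 (max_width - 20)) (-1)).findSome?
      (fun i =>
        if i < PySem.Str.len text then
          match PySem.Str.pyGet? text i with
          | some c =>
              if break_chars.contains c then
                some (if (".,;:!?".toList).contains c then i + 1 else i)
              else none
          | none => none
        else none) with
    | some r => r
    | none => max_width

-- ===== PORT B =====
-- transliteration of Source B: forward fold over the slice, keeping the last break seen
def find_wrap_break_point_py_alt (text : String) (max_width : Int) : Int :=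
  let n := PySem.Str.len text
  if n ≤ max_width then n
  else if max_width ≤ 0 then max_width  -- search window is empty
  else
    let lo : Int := max 0 (max_width - 20) + 1
    let window := PySem.List.slice text.toList (some lo) (some (max_width + 1))
    -- best_c's initial value '' has no Char counterpart; ' ' is never read (best = -1 then)
    let res := (PySem.List.enumerate window 0).foldl
      (fun (acc : Int × Char) p =>
        if (" \t-,.;:!?".toList).contains p.2 then (lo + p.1, p.2) else acc)
      (-1, ' ')
    if res.1 = -1 then max_width
    else if (".,;:!?".toList).contains res.2 then res.1 + 1 else res.1

-- ===== PRECONDITION & SPEC =====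
def Spec_find_wrap_break_point_py (text : String) (max_width : Int) (out : Int) : Prop := out = find_wrap_break_point_py_alt text max_width
instance (text : String) (max_width : Int) (out : Int) : Decidable (Spec_find_wrap_break_point_py text max_width out) := by unfold Spec_find_wrap_break_point_py; infer_instance

-- ===== CLAIM (what is proved, stated in full; the proofs are below) =====
def Claim_equal_find_wrap_break_point_py : Prop := ∀ (text : String) (max_width : Int), Dom_find_wrap_break_point_py text max_width → Spec_find_wrap_break_point_py text max_width (find_wrap_break_point_py text max_width)

-- ===== LEMMAS AND PROOFS =====

-- findSome? of a guarded function is find? then map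
theorem pv_findSome?_guard {α β : Type} (l : List α) (p : α → Bool) (u : α → β) :
    l.findSome? (fun x => if p x then some (u x) else none) = (l.find? p).map u := by
  induction l with
  | nil => simp
  | cons a l ih =>
      by_cases h : p a <;> simp [h, ih]

-- a left fold that keeps the last matching element = first match in the reversed list
theorem pv_keepLast {α β : Type} (l : List α) (p : α → Bool) (u : α → β) (init : β) :
    l.foldl (fun acc x => if p x then u x else acc) init
      = match l.reverse.find? p with
        | some x => u x
        | none => init := by
  induction l using List.reverseRecOn with
  | nil => simp
  | append_singleton l a ih =>
      by_cases h : p a <;> simp [List.foldl_append, h, ih]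

-- enumerate with start s is enumerate from 0 shifted by s
theorem pv_enumerate_shift {α : Type} (cs : List α) (a b : Int) :
    PySem.List.enumerate cs (a + b)
      = (PySem.List.enumerate cs b).map (fun p => (a + p.1, p.2)) := by
  induction cs generalizing b with
  | nil => simp [PySem.List.enumerate_nil]
  | cons c cs ih =>
      have : a + b + 1 = a + (b + 1) := by ring
      simp [PySem.List.enumerate_cons, this, ih]

-- the backward index scan over a window of t equals a scan over the reversed enumeration of the window's characters
theorem pv_A_range (t : List Char) (lo : Nat) (cs : List Char) (fE : Int → Char → Option Int)
    (hlt : (lo : Int) + cs.length ≤ t.length)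
    (hsub : ∀ k (hk : k < cs.length), t[lo + k]? = some cs[k]) :
    ((PySem.List.pyRange lo (lo + (cs.length : Int)) 1).reverse).findSome?
        (fun i =>
          if i < (t.length : Int) then
            match PySem.List.pyGet? t i with
            | some c => fE i c
            | none => none
          else none)
      = ((PySem.List.enumerate cs lo).reverse).findSome? (fun p => fE p.1 p.2) := by
  induction cs using List.reverseRecOn with
  | nil => simp [PySem.List.enumerate_nil]
  | append_singleton cs c ih =>
      have hlen : ((cs ++ [c]).length : Int) = (cs.length : Int) + 1 := by simp
      have hrange : PySem.List.pyRange lo (lo + ((cs ++ [c]).length : Int)) 1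
          = PySem.List.pyRange lo (lo + (cs.length : Int)) 1 ++ [(lo : Int) + cs.length] := by
        rw [hlen, ← add_assoc]
        exact PySem.List.pyRange_one_succ_right (by omega)
      have henum : PySem.List.enumerate (cs ++ [c]) (lo : Int)
          = PySem.List.enumerate cs lo ++ [((lo : Int) + cs.length, c)] := by
        rw [PySem.List.enumerate_append]
        simp [PySem.List.enumerate_cons, PySem.List.enumerate_nil]
      have hlt' : (lo : Int) + cs.length ≤ t.length := by
        simp at hlt; omega
      have hget : PySem.List.pyGet? t ((lo : Int) + cs.length) = some c := by
        have : ((lo : Int) + cs.length) = ((lo + cs.length : Nat) : Int) := by push_cast; ring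
        rw [this, PySem.List.pyGet?_natCast]
        have := hsub cs.length (by simp)
        simpa using this
      rw [hrange, henum, List.reverse_append, List.reverse_append]
      simp only [List.reverse_singleton, List.singleton_append, List.findSome?_cons]
      have hc : ((lo : Int) + cs.length) < (t.length : Int) := by simp at hlt; omega
      rw [if_pos hc, hget]
      cases h : fE ((lo : Int) + cs.length) c with
      | some v => simp [h]
      | none =>
          simp only [h]
          apply ih hlt'
          intro k hk
          have h2 := hsub k (by simp; omega)
          simpa [List.getElem_append, hk] using h2


theorem pv_findSome?_map {α β γ : Type} (l : List α) (g : α → β) (f : β → Option γ) :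
    (l.map g).findSome? f = l.findSome? (fun x => f (g x)) := by
  induction l with
  | nil => simp
  | cons a l ih => cases h : f (g a) <;> simp [h, ih]

theorem pv_main (text : String) (max_width : Int) :
    find_wrap_break_point_py text max_width = find_wrap_break_point_py_alt text max_width := by
  unfold find_wrap_break_point_py find_wrap_break_point_py_alt
  simp only [PySem.Str.len_eq, PySem.Str.pyGet?_eq, PySem.Chars.pyGet?_eq_listPyGet?]
  by_cases h1 : ((text.toList.length : Int)) ≤ max_width
  · simp only [if_pos h1]
  · simp only [if_neg h1]
    have hlen : max_width < (text.toList.length : Int) := by omega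
    by_cases h2 : max_width ≤ 0
    · rw [if_pos h2]
      have hmin : min max_width ((text.toList.length : Int)) = max_width := by omega
      rw [hmin, PySem.List.pyRange_neg_one_eq_nil (by omega)]
      simp
    · rw [if_neg h2]
      have hmin : min max_width ((text.toList.length : Int)) = max_width := by omega
      rw [hmin, PySem.List.pyRange_neg_one_eq_reverse]
      set t := text.toList with ht
      set sI : Int := max 0 (max_width - 20) with hsI
      have hs0 : 0 ≤ sI := le_max_left _ _
      have hsmw : sI < max_width := by omega
      set lo : Int := sI + 1 with hlo
      set cs := PySem.List.slice t (some lo) (some (max_width + 1)) with hcs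
      have hcs' : cs = List.take ((max_width + 1).toNat - lo.toNat) (List.drop lo.toNat t) :=
        PySem.List.slice_toNat t (by omega) (by omega)
      have hcslen : (cs.length : Int) = max_width + 1 - lo := by
        rw [hcs']; simp; omega
      have hloN : ((lo.toNat : Int)) = lo := by omega
      have hsub : ∀ k (hk : k < cs.length), t[lo.toNat + k]? = some cs[k] := by
        intro k hk
        have hkI : (k : Int) < cs.length := by exact_mod_cast hk
        have hk2 : lo.toNat + k < t.length := by omega
        rw [List.getElem?_eq_getElem hk2]
        have e := List.getElem_of_eq hcs' hk
        rw [e, List.getElem_take, List.getElem_drop]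
      have hb : max_width + 1 = (lo.toNat : Int) + cs.length := by omega
      rw [← hloN, hb]
      rw [pv_A_range t lo.toNat cs
        (fun i c =>
          if ([' ', '\t', '-', ',', '.', ';', ':', '!', '?'].contains c) then
            some (if (".,;:!?".toList.contains c) then i + 1 else i)
          else none)
        (by omega) hsub]
      have hshift : PySem.List.enumerate cs ((lo.toNat : Int))
          = (PySem.List.enumerate cs 0).map (fun p => ((lo.toNat : Int) + p.1, p.2)) := by
        simpa using pv_enumerate_shift cs ((lo.toNat : Int)) 0
      rw [hshift, ← List.map_reverse, pv_findSome?_map]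
      rw [pv_findSome?_guard ((PySem.List.enumerate cs 0).reverse)
        (fun x => [' ', '\t', '-', ',', '.', ';', ':', '!', '?'].contains x.2)
        (fun x => if (".,;:!?".toList.contains x.2) then (lo.toNat : Int) + x.1 + 1 else (lo.toNat : Int) + x.1)]
      have hchars : (" \t-,.;:!?".toList) = [' ', '\t', '-', ',', '.', ';', ':', '!', '?'] := by rfl
      rw [pv_keepLast (PySem.List.enumerate cs 0)
        (fun p => (" \t-,.;:!?".toList).contains p.2)
        (fun p => ((lo.toNat : Int) + p.1, p.2)) ((-1 : Int), ' ')]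
      rw [hchars]
      cases hfind : ((PySem.List.enumerate cs 0).reverse).find?
          (fun x => [' ', '\t', '-', ',', '.', ';', ':', '!', '?'].contains x.2) with
      | none => simp
      | some x =>
          have hx : x ∈ PySem.List.enumerate cs 0 :=
            List.mem_reverse.mp (List.mem_of_find?_eq_some hfind)
          have hx1 : 0 ≤ x.1 := by
            obtain ⟨k, hk, hxe⟩ := (PySem.List.mem_enumerate_iff _ _ _).mp hx
            rw [hxe]; simp
          have hne : ¬ ((lo.toNat : Int) + x.1 = -1) := by omega
          simp
          intro h
          omega

-- ===== VERDICT (by name: the statement is the Claim_ definition above) =====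
theorem find_wrap_break_point_py_spec : Claim_equal_find_wrap_break_point_py := by
  intro text max_width _
  unfold Spec_find_wrap_break_point_py
  exact pv_main text max_width
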